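-- pv_equiv track=rewrite | github.com/BryanGarreau/ConstraintWellFoundedSolver | benchmark/nQueens/propositionalNQueensGenerator.py | generateLineConstraint
-- ===== SOURCE A (Python) =====
-- def generateLineConstraint(n):
--     program = "% Line Constraints \n"
--     for line in range(1,n+1):
--         for i in range(1,n+1):
--             for j in range(i+1,n+1):
--                 program += ":- q(" + str(i) + "," + str(line) + "), q(" + str(j) + "," + str(line) + ").\n"
--         program += "\n"
--     return program
-- ===== SOURCE B (Python) =====
-- def generateLineConstraint(n):
--     # One flat while-loop driving an explicit (line, i, j) state machine
--     # instead of three nested for-loops; output collected in a list, joined once.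
--     out = []
--     line, i, j = 1, 1, 2
--     while line <= n:
--         if j <= n:
--             out.append(":- q(%d,%d), q(%d,%d).\n" % (i, line, j, line))
--             j += 1
--         elif i < n:
--             i += 1
--             j = i + 1
--         else:
--             out.append("\n")
--             line += 1
--             i, j = 1, 2
--     return "% Line Constraints \n" + "".join(out)
-- ===== Notes on version B (the rewrite author's own statement) =====
-- stated objective: alternative
-- what changed: A's three nested for-loops with string += are replaced by one flat while-loop driving an explicit (line,i,j) state machine that appends formatted pieces to a list joined once at the end.
import Mathlib
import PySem

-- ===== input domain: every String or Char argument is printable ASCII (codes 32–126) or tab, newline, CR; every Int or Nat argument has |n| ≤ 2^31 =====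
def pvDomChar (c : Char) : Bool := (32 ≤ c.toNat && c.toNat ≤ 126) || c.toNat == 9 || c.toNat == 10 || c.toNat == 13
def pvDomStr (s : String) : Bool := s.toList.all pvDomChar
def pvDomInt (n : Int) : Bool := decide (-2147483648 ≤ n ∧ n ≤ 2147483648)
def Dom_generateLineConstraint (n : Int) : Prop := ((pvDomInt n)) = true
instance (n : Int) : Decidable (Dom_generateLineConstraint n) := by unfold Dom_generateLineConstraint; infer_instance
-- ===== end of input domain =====

-- B replaces A's three nested for-loops by one flat while-loop driving an explicit (line,i,j)
-- state machine, collecting parts in a list joined once at the end (alternative decomposition).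


-- ===== PORT A =====
def generateLineConstraint (n : Int) : String :=
  (PySem.List.pyRange 1 (n + 1) 1).foldl (fun program line =>
    ((PySem.List.pyRange 1 (n + 1) 1).foldl (fun program i =>
      (PySem.List.pyRange (i + 1) (n + 1) 1).foldl (fun program j =>
        program ++ (":- q(" ++ PySem.Int.toStr i ++ "," ++ PySem.Int.toStr line ++ "), q("
          ++ PySem.Int.toStr j ++ "," ++ PySem.Int.toStr line ++ ").\n")) program) program) ++ "\n")
    "% Line Constraints \n"

-- ===== PORT B =====
-- the "%d,%d), q(%d,%d" formatted constraint piece of Source B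
def pvPiece (i line j : Int) : String :=
  ":- q(" ++ PySem.Int.toStr i ++ "," ++ PySem.Int.toStr line ++ "), q("
    ++ PySem.Int.toStr j ++ "," ++ PySem.Int.toStr line ++ ").\n"

-- Source B's single while-loop over the explicit (line, i, j) state, appending to `out`
def pvLoop (n line i j : Int) (out : List String) : List String :=
  if _hline : line ≤ n then
    if _hj : j ≤ n then
      pvLoop n line i (j + 1) (out ++ [pvPiece i line j])
    else if _hi : i < n then
      pvLoop n line (i + 1) (i + 2) out
    else
      pvLoop n (line + 1) 1 2 (out ++ ["\n"])
  else out
termination_by ((n + 1 - line).toNat, (n + 1 - i).toNat, (n + 1 - j).toNat)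
decreasing_by
  · right; right; omega
  · right; left; omega
  · left; omega

def generateLineConstraint_alt (n : Int) : String :=
  "% Line Constraints \n" ++ PySem.Str.join "" (pvLoop n 1 1 2 [])

-- ===== PRECONDITION & SPEC =====
def Spec_generateLineConstraint (n : Int) (out : String) : Prop := out = generateLineConstraint_alt n
instance (n : Int) (out : String) : Decidable (Spec_generateLineConstraint n out) := by unfold Spec_generateLineConstraint; infer_instance

-- ===== CLAIM (what is proved, stated in full; the proofs are below) =====
def Claim_equal_generateLineConstraint : Prop := ∀ (n : Int), Dom_generateLineConstraint n → Spec_generateLineConstraint n (generateLineConstraint n)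

-- ===== LEMMAS AND PROOFS =====

theorem join_empty_cons (x : String) (xs : List String) :
    PySem.Str.join "" (x :: xs) = x ++ PySem.Str.join "" xs := by
  apply String.toList_inj.mp
  cases xs with
  | nil => simp [PySem.Str.join, PySem.Chars.join, List.intercalate]
  | cons y ys =>
    simp [PySem.Str.join, PySem.Chars.join, List.intercalate, String.toList_append]

theorem join_empty_append (xs ys : List String) :
    PySem.Str.join "" (xs ++ ys) = PySem.Str.join "" xs ++ PySem.Str.join "" ys := by
  induction xs with
  | nil => simp [PySem.Str.join, PySem.Chars.join, List.intercalate]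
  | cons x xs ih =>
    rw [List.cons_append, join_empty_cons, join_empty_cons, ih, String.append_assoc]

-- "".join over per-group joins is "".join over the flattened groups
theorem join_map_join_flatMap {α : Type} (l : List α) (g : α → List String) :
    PySem.Str.join "" (l.map (fun i => PySem.Str.join "" (g i)))
      = PySem.Str.join "" (l.flatMap g) := by
  induction l with
  | nil => rfl
  | cons x xs ih =>
    rw [List.map_cons, List.flatMap_cons, join_empty_cons, join_empty_append, ih]

-- a fold that appends f x onto a string accumulator is acc ++ join of the pieces
theorem foldl_strcat {α : Type} (l : List α) (f : α → String) (acc : String) :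
    l.foldl (fun a x => a ++ f x) acc = acc ++ PySem.Str.join "" (l.map f) := by
  induction l generalizing acc with
  | nil => simp [PySem.Str.join, PySem.Chars.join, List.intercalate]
  | cons x xs ih =>
    simp only [List.foldl_cons, List.map_cons, join_empty_cons]
    rw [ih, String.append_assoc]

-- B's loop, j-phase: it emits the pieces for j, j+1, …, n of the current row
theorem pvLoop_row (n line i : Int) (hline : line ≤ n) :
    ∀ j out, pvLoop n line i j out
      = (if i < n then pvLoop n line (i + 1) (i + 2)
            (out ++ (PySem.List.pyRange j (n + 1) 1).map (pvPiece i line))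
         else pvLoop n (line + 1) 1 2
            (out ++ (PySem.List.pyRange j (n + 1) 1).map (pvPiece i line) ++ ["\n"])) := by
  intro j
  induction hk : (n + 1 - j).toNat generalizing j with
  | zero =>
    intro out
    have hj : ¬ j ≤ n := by omega
    rw [pvLoop, dif_pos hline, dif_neg hj, PySem.List.pyRange_one_eq_nil (by omega)]
    simp only [List.map_nil, List.append_nil]
    split_ifs <;> rfl
  | succ k ih =>
    intro out
    have hj : j ≤ n := by omega
    rw [pvLoop, dif_pos hline, dif_pos hj, ih (j + 1) (by omega)]
    rw [PySem.List.pyRange_one_cons (show j < n + 1 by omega)]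
    split_ifs <;> simp [List.append_assoc]

-- B's loop, i-phase: from the start of row i it emits all rows i…n and the line's "\n"
theorem pvLoop_block (n line : Int) (hline : line ≤ n) :
    ∀ i, 1 ≤ i → ∀ out, pvLoop n line i (i + 1) out
      = pvLoop n (line + 1) 1 2
          (out ++ (PySem.List.pyRange i (n + 1) 1).flatMap
            (fun i' => (PySem.List.pyRange (i' + 1) (n + 1) 1).map (pvPiece i' line)) ++ ["\n"]) := by
  intro i
  induction hk : (n + 1 - i).toNat generalizing i with
  | zero =>
    intro hi1 out
    have hi : ¬ i < n := by omega
    rw [pvLoop_row n line i hline, if_neg hi, PySem.List.pyRange_one_eq_nil (by omega)]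
    -- the j-range from i+1 is also empty since i > n … but careful: i could equal n? no, k=0 → i ≥ n+1? n+1-i ≤ 0 → i ≥ n+1
    rw [PySem.List.pyRange_one_eq_nil (by omega)]
    simp
  | succ k ih =>
    intro hi1 out
    by_cases hi : i < n
    · rw [pvLoop_row n line i hline, if_pos hi,
        show i + 2 = (i + 1) + 1 by ring, ih (i + 1) (by omega) (by omega),
        PySem.List.pyRange_one_cons (show i < n + 1 by omega)]
      simp [List.append_assoc]
    · -- i = n (since n + 1 - i > 0 → i ≤ n)
      have hie : i = n := by omega
      rw [pvLoop_row n line i hline, if_neg hi,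
        PySem.List.pyRange_one_cons (show i < n + 1 by omega)]
      have hnil : PySem.List.pyRange (i + 1) (n + 1) 1 = [] :=
        PySem.List.pyRange_one_eq_nil (by omega)
      simp [hnil]

-- B's loop, line-phase: from the start of a line it emits all remaining lines' blocks
theorem pvLoop_lines (n : Int) :
    ∀ line, 1 ≤ line → ∀ out, pvLoop n line 1 2 out
      = out ++ (PySem.List.pyRange line (n + 1) 1).flatMap (fun L =>
          (PySem.List.pyRange 1 (n + 1) 1).flatMap
            (fun i => (PySem.List.pyRange (i + 1) (n + 1) 1).map (pvPiece i L)) ++ ["\n"]) := by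
  intro line
  induction hk : (n + 1 - line).toNat generalizing line with
  | zero =>
    intro h1 out
    have hline : ¬ line ≤ n := by omega
    have hnil : PySem.List.pyRange line (n + 1) 1 = [] :=
      PySem.List.pyRange_one_eq_nil (by omega)
    rw [pvLoop, dif_neg hline, hnil]
    simp
  | succ k ih =>
    intro h1 out
    have hline : line ≤ n := by omega
    rw [show (2 : Int) = 1 + 1 by norm_num, pvLoop_block n line hline 1 le_rfl,
      ih (line + 1) (by omega) (by omega),
      PySem.List.pyRange_one_cons (show line < n + 1 by omega)]
    simp [List.append_assoc]

theorem generateLineConstraint_spec : Claim_equal_generateLineConstraint := by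
  intro n _
  show generateLineConstraint n = generateLineConstraint_alt n
  unfold generateLineConstraint generateLineConstraint_alt
  rw [pvLoop_lines n 1 le_rfl []]
  simp only [List.nil_append]
  -- A side: turn the nested string folds into a join over the same flatMap structure
  have hA : ∀ (acc : String),
      (PySem.List.pyRange 1 (n + 1) 1).foldl (fun program line =>
        ((PySem.List.pyRange 1 (n + 1) 1).foldl (fun program i =>
          (PySem.List.pyRange (i + 1) (n + 1) 1).foldl (fun program j =>
            program ++ pvPiece i line j) program) program) ++ "\n") acc
      = acc ++ PySem.Str.join "" ((PySem.List.pyRange 1 (n + 1) 1).flatMap (fun L =>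
          (PySem.List.pyRange 1 (n + 1) 1).flatMap
            (fun i => (PySem.List.pyRange (i + 1) (n + 1) 1).map (pvPiece i L)) ++ ["\n"])) := by
    intro acc
    have hline : ∀ (L : Int) (a : String),
        ((PySem.List.pyRange 1 (n + 1) 1).foldl (fun program i =>
          (PySem.List.pyRange (i + 1) (n + 1) 1).foldl (fun program j =>
            program ++ pvPiece i L j) program) a) ++ "\n"
        = a ++ PySem.Str.join ""
            ((PySem.List.pyRange 1 (n + 1) 1).flatMap
              (fun i => (PySem.List.pyRange (i + 1) (n + 1) 1).map (pvPiece i L)) ++ ["\n"]) := by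
      intro L a
      have hrow : ∀ (i : Int) (b : String),
          (PySem.List.pyRange (i + 1) (n + 1) 1).foldl (fun program j =>
            program ++ pvPiece i L j) b
          = b ++ PySem.Str.join "" ((PySem.List.pyRange (i + 1) (n + 1) 1).map (pvPiece i L)) := by
        intro i b
        exact foldl_strcat _ _ _
      calc (PySem.List.pyRange 1 (n + 1) 1).foldl (fun program i =>
              (PySem.List.pyRange (i + 1) (n + 1) 1).foldl (fun program j =>
                program ++ pvPiece i L j) program) a ++ "\n"
          = (PySem.List.pyRange 1 (n + 1) 1).foldl (fun program i =>
              program ++ PySem.Str.join ""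
                ((PySem.List.pyRange (i + 1) (n + 1) 1).map (pvPiece i L))) a ++ "\n" := by
            rw [PySem.List.foldl_congr_mem _ _ _ a (fun b i _ => hrow i b)]
        _ = a ++ PySem.Str.join ""
              ((PySem.List.pyRange 1 (n + 1) 1).flatMap
                (fun i => (PySem.List.pyRange (i + 1) (n + 1) 1).map (pvPiece i L))) ++ "\n" := by
            rw [foldl_strcat, join_map_join_flatMap]
        _ = _ := by
            rw [join_empty_append, join_empty_cons,
              show PySem.Str.join "" ([] : List String) = "" by rfl]
            simp [String.append_assoc]
    calc (PySem.List.pyRange 1 (n + 1) 1).foldl _ acc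
        = (PySem.List.pyRange 1 (n + 1) 1).foldl (fun a L =>
            a ++ PySem.Str.join ""
              ((PySem.List.pyRange 1 (n + 1) 1).flatMap
                (fun i => (PySem.List.pyRange (i + 1) (n + 1) 1).map (pvPiece i L)) ++ ["\n"])) acc := by
          exact PySem.List.foldl_congr_mem _ _ _ acc (fun a L _ => hline L a)
      _ = _ := by
          rw [foldl_strcat, join_map_join_flatMap]
  exact hA "% Line Constraints \n"
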